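-- pv_equiv track=rewrite | github.com/rasigadelab/bashpipes | Phylogeny_pipe/src/modules/extract_core_snps_after_gubbins.py | build_maps_from_clean_ref
-- ===== SOURCE A (Python) =====
-- def build_maps_from_clean_ref(clean_ref_seq):
--     """
--     For each alignment column idx, if reference has a base (not '-'), increment linear genome position.
--
--     Args:
--         clean_ref_seq (str): clean DNA sequence of reference genome extracted from alignment file.
--
--     Returns:
--       genomepos_to_col : dictionary indicating the position of informative bases (no "-")
--       col_to_genomepos : list length = aln_len, with pos0 or None
--     """
--     genomepos_to_col = {} # {linear_pos0 -> ref_col_index}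
--     col_to_genomepos = [None] * len(clean_ref_seq) # (list length = aln_len, with pos0 or None)
--     pos0 = 0 # position of next informative base
--     for idx, base in enumerate(clean_ref_seq):
--         if base == "-":
--             # At this position in reference there is no base (-).
--             # pos0 does not change
--             col_to_genomepos[idx] = None
--         else:
--             # At this position in reference there is a base (ATCG).
--             # Info: at this position, there is an informative base
--             col_to_genomepos[idx] = pos0
--             # Info: informative base is at idx position in reference
--             genomepos_to_col[pos0] = idx
--             pos0 += 1
--     return genomepos_to_col, col_to_genomepos
-- ===== SOURCE B (Python) =====
-- def build_maps_from_clean_ref(clean_ref_seq):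
--     # Divide and conquer: solve each half independently with positions local to
--     # that half, then merge by offsetting the right half's columns by the split
--     # point and its positions by the left half's informative-base count.
--     def rec(seg):
--         # returns (pairs [(pos0, col)], col_to_genomepos list, informative count),
--         # all local to seg
--         if len(seg) <= 1:
--             if seg and seg != "-":
--                 return [(0, 0)], [0], 1
--             return [], [None] * len(seg), 0
--         mid = len(seg) // 2
--         lp, lc, ln = rec(seg[:mid])
--         rp, rc, rn = rec(seg[mid:])
--         return (lp + [(p + ln, c + mid) for p, c in rp],
--                 lc + [x + ln if x is not None else None for x in rc],
--                 ln + rn)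
--     pairs, cols, _ = rec(clean_ref_seq)
--     return dict(pairs), cols
-- ===== Notes on version B (the rewrite author's own statement) =====
-- stated objective: alternative
-- what changed: B is a divide-and-conquer: it recursively solves the two halves of the string with positions local to each half, then merges by offsetting the right half's columns by the split point and its positions by the left half's informative-base count, instead of A's single left-to-right scan threading a running position counter.
import Mathlib
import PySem

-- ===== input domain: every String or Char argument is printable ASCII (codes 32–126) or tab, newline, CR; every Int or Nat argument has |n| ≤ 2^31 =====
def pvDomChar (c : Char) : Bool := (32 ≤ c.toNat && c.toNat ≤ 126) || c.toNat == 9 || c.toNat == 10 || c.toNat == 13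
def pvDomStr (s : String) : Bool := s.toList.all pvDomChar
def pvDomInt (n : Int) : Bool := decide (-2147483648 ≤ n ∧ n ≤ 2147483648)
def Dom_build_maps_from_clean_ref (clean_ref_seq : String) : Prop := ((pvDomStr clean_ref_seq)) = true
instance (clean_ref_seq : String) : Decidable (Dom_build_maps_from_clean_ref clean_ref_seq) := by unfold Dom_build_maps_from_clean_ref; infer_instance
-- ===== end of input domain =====

-- B solves the two halves of the string recursively with positions local to
-- each half and merges them with offsets, instead of A's single left-to-right
-- scan threading a running position counter (objective: alternative).

-- ===== PORT A =====
-- A's for-loop over enumerate(clean_ref_seq), threading the dict, the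
-- preallocated list and the running pos0 through each step.
def buildA (d : PySem.Dict Int Int) (c : List (Option Int)) (idx : Nat) (pos0 : Int) :
    List Char → PySem.Dict Int Int × List (Option Int) × Int
  | [] => (d, c, pos0)
  | base :: rest =>
    if base = '-' then
      buildA d (c.set idx none) (idx + 1) pos0 rest
    else
      buildA (d.insert pos0 (idx : Int)) (c.set idx (some pos0)) (idx + 1) (pos0 + 1) rest

def build_maps_from_clean_ref (clean_ref_seq : String) : (List (Int × Int)) × List (Option Int) :=
  let r := buildA PySem.Dict.empty (List.replicate clean_ref_seq.toList.length (none : Option Int)) 0 0 clean_ref_seq.toList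
  (r.1.items, r.2.1)

-- ===== PORT B =====
-- Source B's rec(seg): divide and conquer over the character list; the right
-- half's columns are offset by mid, its positions by the left half's count.
-- merge step of Source B's rec: offset the right half's columns by mid and its
-- positions by the left half's informative count, and concatenate.
def mergeB (mid : Nat) (L R : List (Int × Int) × List (Option Int) × Int) :
    List (Int × Int) × List (Option Int) × Int :=
  (L.1 ++ R.1.map (fun p => (p.1 + L.2.2, p.2 + (mid : Int))),
   L.2.1 ++ R.2.1.map (Option.map (· + L.2.2)),
   L.2.2 + R.2.2)

def recB : List Char → List (Int × Int) × List (Option Int) × Int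
  | [] => ([], [], 0)
  | [b] => if b = '-' then ([], [none], 0) else ([((0 : Int), (0 : Int))], [some 0], 1)
  | b1 :: b2 :: rest =>
    mergeB ((b1 :: b2 :: rest).length / 2)
      (recB ((b1 :: b2 :: rest).take ((b1 :: b2 :: rest).length / 2)))
      (recB ((b1 :: b2 :: rest).drop ((b1 :: b2 :: rest).length / 2)))
termination_by l => l.length
decreasing_by
  · simp [List.length_take]; omega
  · simp [List.length_drop]; omega

def build_maps_from_clean_ref_alt (clean_ref_seq : String) : (List (Int × Int)) × List (Option Int) :=
  let r := recB clean_ref_seq.toList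
  ((PySem.Dict.ofList r.1).items, r.2.1)

-- ===== PRECONDITION & SPEC =====
def Spec_build_maps_from_clean_ref (clean_ref_seq : String) (out : (List (Int × Int)) × List (Option Int)) : Prop := out = build_maps_from_clean_ref_alt clean_ref_seq
instance (clean_ref_seq : String) (out : (List (Int × Int)) × List (Option Int)) : Decidable (Spec_build_maps_from_clean_ref clean_ref_seq out) := by unfold Spec_build_maps_from_clean_ref; infer_instance

-- ===== CLAIM (what is proved, stated in full; the proofs are below) =====
def Claim_equal_build_maps_from_clean_ref : Prop := ∀ (clean_ref_seq : String), Dom_build_maps_from_clean_ref clean_ref_seq → Spec_build_maps_from_clean_ref clean_ref_seq (build_maps_from_clean_ref clean_ref_seq)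

-- ===== LEMMAS AND PROOFS =====

-- Common reference shape both programs are reduced to: the (pos0, col) pairs,
-- the column list and the informative count, as structural recursions.
def specDict (idx pos0 : Int) : List Char → List (Int × Int)
  | [] => []
  | b :: rest => if b = '-' then specDict (idx + 1) pos0 rest
                 else (pos0, idx) :: specDict (idx + 1) (pos0 + 1) rest

def specCol (pos0 : Int) : List Char → List (Option Int)
  | [] => []
  | b :: rest => if b = '-' then none :: specCol pos0 rest
                 else some pos0 :: specCol (pos0 + 1) rest

def cnt : List Char → Int
  | [] => 0
  | b :: rest => (if b = '-' then 0 else 1) + cnt rest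

lemma buildA_spec (l : List Char) (d : PySem.Dict Int Int) (done : List (Option Int))
    (pos0 : Int) (hd : ∀ k, d.contains k = true → k < pos0) :
    (buildA d (done ++ List.replicate l.length none) done.length pos0 l).1.items
      = d.items ++ specDict (done.length : Int) pos0 l ∧
    (buildA d (done ++ List.replicate l.length none) done.length pos0 l).2.1
      = done ++ specCol pos0 l := by
  induction l generalizing d done pos0 with
  | nil => simp [buildA, specDict, specCol]
  | cons b rest ih =>
    by_cases hb : b = '-'
    · have h2 := ih d (done ++ [none]) pos0 hd
      simp only [List.length_append, List.length_singleton, List.append_assoc,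
        List.singleton_append, Nat.cast_add, Nat.cast_one] at h2
      simp [buildA, hb, specDict, specCol, List.replicate_succ, h2]
    · have hfresh : d.contains pos0 = false := by
        by_contra h
        have := hd pos0 (by simpa using h)
        omega
      have hd2 : ∀ k, (d.insert pos0 (done.length : Int)).contains k = true → k < pos0 + 1 := by
        intro k hk
        rw [PySem.Dict.contains_insert] at hk
        rcases Bool.or_eq_true_iff.mp hk with h | h
        · have : k = pos0 := by simpa using h
          omega
        · exact lt_trans (hd k h) (by omega)
      have h2 := ih (d.insert pos0 (done.length : Int)) (done ++ [some pos0]) (pos0 + 1) hd2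
      simp only [List.length_append, List.length_singleton, List.append_assoc,
        List.singleton_append, Nat.cast_add, Nat.cast_one] at h2
      simp [buildA, hb, specDict, specCol, List.replicate_succ, h2,
        PySem.Dict.items_insert, hfresh]

lemma specDict_append (l1 l2 : List Char) (i p : Int) :
    specDict i p (l1 ++ l2) = specDict i p l1 ++ specDict (i + l1.length) (p + cnt l1) l2 := by
  induction l1 generalizing i p with
  | nil => simp [specDict, cnt]
  | cons b rest ih =>
    by_cases hb : b = '-' <;>
      simp [specDict, cnt, hb, ih, Nat.cast_add, Nat.cast_one] <;>
      ring_nf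
  
lemma specCol_append (l1 l2 : List Char) (p : Int) :
    specCol p (l1 ++ l2) = specCol p l1 ++ specCol (p + cnt l1) l2 := by
  induction l1 generalizing p with
  | nil => simp [specCol, cnt]
  | cons b rest ih =>
    by_cases hb : b = '-'
    · simp [specCol, cnt, hb, ih]
    · simp [specCol, cnt, hb, ih]; ring_nf

lemma specDict_shift (l : List Char) (i p : Int) :
    specDict i p l = (specDict 0 0 l).map (fun q => (q.1 + p, q.2 + i)) := by
  induction l generalizing i p with
  | nil => simp [specDict]
  | cons b rest ih =>
    by_cases hb : b = '-'
    · simp [specDict, hb, ih (i + 1) p, ih 1 0, List.map_map]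
      intro a b _; ring
    · simp [specDict, hb, ih (i + 1) (p + 1), ih 1 1, List.map_map]
      intro a b _; constructor <;> ring

lemma specCol_shift (l : List Char) (p : Int) :
    specCol p l = (specCol 0 l).map (Option.map (· + p)) := by
  induction l generalizing p with
  | nil => simp [specCol]
  | cons b rest ih =>
    by_cases hb : b = '-'
    · simp [specCol, hb, ih p]
    · simp [specCol, hb, ih (p + 1), ih 1, List.map_map]
      intro a _
      cases a with
      | none => rfl
      | some x => simp; ring

lemma recB_spec (l : List Char) :
    recB l = (specDict 0 0 l, specCol 0 l, cnt l) := by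
  fun_induction recB l
  case case1 => simp [specDict, specCol, cnt]
  case case2 => simp [specDict, specCol, cnt]
  case case3 =>
    rename_i b hb
    simp [specDict, specCol, cnt, hb]
  case case4 =>
    rename_i b1 b2 rest ih2 ih1
    rw [ih2, ih1]
    unfold mergeB
    have hsplit : (b1 :: b2 :: rest) =
        (b1 :: b2 :: rest).take ((b1 :: b2 :: rest).length / 2)
          ++ (b1 :: b2 :: rest).drop ((b1 :: b2 :: rest).length / 2) :=
      (List.take_append_drop _ _).symm
    have hlen : ((b1 :: b2 :: rest).take ((b1 :: b2 :: rest).length / 2)).length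
        = (b1 :: b2 :: rest).length / 2 := by
      simp [List.length_take]; omega
    refine Prod.ext ?_ (Prod.ext ?_ ?_) <;> simp only []
    · conv_rhs => rw [hsplit]
      rw [specDict_append, hlen]
      simp only [zero_add]
      rw [specDict_shift ((b1 :: b2 :: rest).drop ((b1 :: b2 :: rest).length / 2))
        ((((b1 :: b2 :: rest).length / 2 : Nat)) : Int)
        (cnt ((b1 :: b2 :: rest).take ((b1 :: b2 :: rest).length / 2)))]
    · conv_rhs => rw [hsplit]
      rw [specCol_append]
      simp only [zero_add]
      rw [specCol_shift ((b1 :: b2 :: rest).drop ((b1 :: b2 :: rest).length / 2))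
        (cnt ((b1 :: b2 :: rest).take ((b1 :: b2 :: rest).length / 2)))]
    · conv_rhs => rw [hsplit]
      clear hsplit hlen ih2 ih1
      generalize (b1 :: b2 :: rest).take ((b1 :: b2 :: rest).length / 2) = t
      generalize (b1 :: b2 :: rest).drop ((b1 :: b2 :: rest).length / 2) = u
      induction t with
      | nil => simp [cnt]
      | cons x xs ih => simp [cnt]; omega

lemma specDict_key_ge (l : List Char) (i p : Int) :
    ∀ q ∈ specDict i p l, p ≤ q.1 := by
  induction l generalizing i p with
  | nil => simp [specDict]
  | cons b rest ih =>
    intro q hq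
    by_cases hb : b = '-'
    · simp only [specDict, hb, if_true] at hq
      exact ih _ _ q hq
    · simp only [specDict, hb, if_false, List.mem_cons] at hq
      rcases hq with h | h
      · simp [h]
      · have := ih (i + 1) (p + 1) q h; omega

lemma specDict_keys_nodup (l : List Char) (i p : Int) :
    ((specDict i p l).map (·.1)).Nodup := by
  induction l generalizing i p with
  | nil => simp [specDict]
  | cons b rest ih =>
    by_cases hb : b = '-'
    · simpa [specDict, hb] using ih (i + 1) p
    · simp only [specDict, hb, if_false, List.map_cons, List.nodup_cons]
      refine ⟨?_, ih (i + 1) (p + 1)⟩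
      intro hmem
      rcases List.mem_map.mp hmem with ⟨q, hq, hq1⟩
      have := specDict_key_ge rest (i + 1) (p + 1) q hq
      omega

lemma ofList_items_specDict (l : List Char) :
    (PySem.Dict.ofList (specDict 0 0 l)).items = specDict 0 0 l := by
  have h := PySem.Dict.items_foldl_insert_fresh (l := specDict 0 0 l)
    (d := PySem.Dict.empty) (k := Prod.fst) (v := Prod.snd)
    (by intro a _; simp [PySem.Dict.contains_empty])
    (specDict_keys_nodup l 0 0)
  simpa [PySem.Dict.empty] using h

-- ===== VERDICT (by name: the statement is the Claim_ definition above) =====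
theorem build_maps_from_clean_ref_spec : Claim_equal_build_maps_from_clean_ref := by
  intro s _
  unfold Spec_build_maps_from_clean_ref build_maps_from_clean_ref build_maps_from_clean_ref_alt
  have hA := buildA_spec s.toList PySem.Dict.empty [] 0
    (by intro k hk; simp [PySem.Dict.contains_empty] at hk)
  simp only [List.nil_append, List.length_nil, Nat.cast_zero] at hA
  rw [recB_spec]
  refine Prod.ext ?_ ?_ <;> simp only []
  · rw [hA.1, ofList_items_specDict]
    simp [PySem.Dict.empty]
  · rw [hA.2]
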